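-- pv_equiv track=rewrite | github.com/mikechen66/Data_Structures_Algorithms_in_Python | chapter03/solutions.py | example3
-- ===== SOURCE A (Python) =====
-- def example3(S):
--     """Return the sum of the elemnets in sequnce S."""
--     n = len(S)
--     total = 0
--     count = 0
--     num_calc = []
--     for j in range(n):
--         for k in range(1+j):
--             total += S[j]
--             count += 1
--         num_calc.append(count)
--     return total, num_calc
-- ===== SOURCE B (Python) =====
-- def example3(S):
--     """Return the sum of the elemnets in sequnce S."""
--     total = 0
--     count = 0
--     num_calc = []
--     for j, x in enumerate(S):
--         total += x * (j + 1)
--         count += j + 1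
--         num_calc.append(count)
--     return total, num_calc
-- ===== Notes on version B (the rewrite author's own statement) =====
-- stated objective: faster
-- what changed: Replaced the quadratic nested loop (adding S[j] once per inner step) by a single pass over enumerate(S) that adds S[j]*(j+1) and j+1 directly.
import Mathlib
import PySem

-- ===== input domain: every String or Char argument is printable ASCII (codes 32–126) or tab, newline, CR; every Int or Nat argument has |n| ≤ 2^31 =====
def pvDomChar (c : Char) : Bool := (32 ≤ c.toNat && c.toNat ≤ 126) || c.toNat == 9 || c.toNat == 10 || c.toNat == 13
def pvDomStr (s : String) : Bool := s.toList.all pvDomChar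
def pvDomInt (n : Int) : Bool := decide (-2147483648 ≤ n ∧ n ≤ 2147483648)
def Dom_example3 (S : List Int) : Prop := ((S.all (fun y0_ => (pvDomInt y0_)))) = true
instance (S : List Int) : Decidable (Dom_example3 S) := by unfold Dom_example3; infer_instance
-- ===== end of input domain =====

-- B replaces A's quadratic nested loops by one pass adding S[j]*(j+1) and j+1 (asymptotically faster).

-- ===== PORT A =====
def example3 (S : List Int) : Int × List Int :=
  let n : Int := S.length
  let res := (PySem.List.pyRange 0 n 1).foldl
    (fun (st : Int × Int × List Int) j =>
      let p := (PySem.List.pyRange 0 (1 + j) 1).foldl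
        (fun (p : Int × Int) _k => (p.1 + PySem.List.pyGetD S j 0, p.2 + 1)) (st.1, st.2.1)
      (p.1, p.2, st.2.2 ++ [p.2])) (0, 0, [])
  (res.1, res.2.2)

-- ===== PORT B =====
def example3_alt (S : List Int) : Int × List Int :=
  let res := (PySem.List.enumerate S 0).foldl
    (fun (st : Int × Int × List Int) jx =>
      let total := st.1 + jx.2 * (jx.1 + 1)
      let count := st.2.1 + (jx.1 + 1)
      (total, count, st.2.2 ++ [count])) (0, 0, [])
  (res.1, res.2.2)

-- ===== PRECONDITION & SPEC =====
def Spec_example3 (S : List Int) (out : Int × List Int) : Prop := out = example3_alt S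
instance (S : List Int) (out : Int × List Int) : Decidable (Spec_example3 S out) := by unfold Spec_example3; infer_instance

-- ===== CLAIM (what is proved, stated in full; the proofs are below) =====
def Claim_equal_example3 : Prop := ∀ (S : List Int), Dom_example3 S → Spec_example3 S (example3 S)

-- ===== LEMMAS AND PROOFS =====

-- A's inner loop only counts: starting from (t, c) it yields (t + len·v, c + len).
theorem pv_inner_fold (l : List Int) (v t c : Int) :
    l.foldl (fun (p : Int × Int) _ => (p.1 + v, p.2 + 1)) (t, c)
      = (t + l.length * v, c + l.length) := by
  induction l generalizing t c with
  | nil => simp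
  | cons x xs ih => simp [List.foldl_cons, ih]; constructor <;> ring

-- Stepwise: with the inner loop summarised by pv_inner_fold, A's outer fold equals B's fold.
theorem pv_fold_eq (S : List Int) (l : List Int) (h : ∀ x ∈ l, 0 ≤ x)
    (init : Int × Int × List Int) :
    l.foldl (fun (st : Int × Int × List Int) j =>
        let p := (PySem.List.pyRange 0 (1 + j) 1).foldl
          (fun (p : Int × Int) _k => (p.1 + PySem.List.pyGetD S j 0, p.2 + 1)) (st.1, st.2.1)
        (p.1, p.2, st.2.2 ++ [p.2])) init
    = l.foldl (fun (st : Int × Int × List Int) j =>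
        (st.1 + PySem.List.pyGetD S j 0 * (j + 1), st.2.1 + (j + 1),
          st.2.2 ++ [st.2.1 + (j + 1)])) init := by
  induction l generalizing init with
  | nil => rfl
  | cons x xs ih =>
    have hx : (0:Int) ≤ x := h x (by simp)
    have hlen : ((PySem.List.pyRange 0 (1 + x) 1).length : Int) = 1 + x := by
      rw [PySem.List.length_pyRange_one]; omega
    rw [List.foldl_cons, List.foldl_cons, ih (fun y hy => h y (List.mem_cons_of_mem _ hy))]
    congr 1
    simp only [pv_inner_fold, hlen]
    refine Prod.ext (by ring) (Prod.ext (by ring) ?_)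
    simp only []
    congr 2
    ring

-- ===== VERDICT (by name: the statement is the Claim_ definition above) =====
theorem example3_spec : Claim_equal_example3 := by
  intro S _
  unfold Spec_example3 example3 example3_alt
  rw [PySem.List.enumerate_eq_map_pyRange (d := 0), List.foldl_map]
  simp only [PySem.List.len_eq]
  rw [pv_fold_eq S _ (fun x hx => (PySem.List.mem_pyRange_one.mp hx).1)]
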